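-- pv_equiv track=rewrite | github.com/kaistAI/coverage-principle | dataset_generation/composition_imbalanced.py | build_dicts
-- ===== SOURCE A (Python) =====
-- def build_dicts(entities):
--     entity2ind = {}
--     ind2entity = []
--     for i in range(len(entities)):
--         entity = entities[i]
--         if entity not in ind2entity:
--             ind2entity.append(entity)
--             entity2ind[entity] = len(ind2entity) - 1
--     return ind2entity, entity2ind
-- ===== SOURCE B (Python) =====
-- def build_dicts(entities):
--     # Build the dedup list back-to-front: walk the input in reverse and, for each
--     # element, prepend it and filter out its later duplicates from the accumulator.
--     # This keeps exactly the first occurrence of each entity in original order,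
--     # with no membership test at all.
--     ind2entity = []
--     for entity in reversed(entities):
--         ind2entity = [entity] + [e for e in ind2entity if e != entity]
--     entity2ind = {e: i for i, e in enumerate(ind2entity)}
--     return ind2entity, entity2ind
-- ===== Notes on version B (the rewrite author's own statement) =====
-- stated objective: alternative
-- what changed: Replaces A's forward fused loop (membership test on the growing list, append, dict assignment interleaved) with a reverse traversal that prepends each element and filters its later duplicates out of the accumulator (no membership branch), followed by a separate enumerate pass for the index map.
import Mathlib
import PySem

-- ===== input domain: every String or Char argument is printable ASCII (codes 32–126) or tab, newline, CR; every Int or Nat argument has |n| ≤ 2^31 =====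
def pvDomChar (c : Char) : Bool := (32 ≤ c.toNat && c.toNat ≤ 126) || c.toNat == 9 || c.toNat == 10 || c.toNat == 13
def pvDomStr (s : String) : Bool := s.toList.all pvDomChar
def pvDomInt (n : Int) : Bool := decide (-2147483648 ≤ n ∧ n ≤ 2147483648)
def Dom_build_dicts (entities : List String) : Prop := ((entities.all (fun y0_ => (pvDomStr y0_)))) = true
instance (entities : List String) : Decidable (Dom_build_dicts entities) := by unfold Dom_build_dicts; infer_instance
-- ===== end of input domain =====

-- B replaces A's fused forward dedup/index loop by a reverse traversal that prepends each
-- element and filters out its later duplicates (no membership branch), then a separate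
-- enumerate pass for the index map; objective: alternative.

-- ===== PORT A =====
-- the per-iteration body of A's for-loop: state = (entity2ind, ind2entity)
def pvStepA (acc : PySem.Dict String Int × List String) (entity : String) :
    PySem.Dict String Int × List String :=
  if entity ∈ acc.2 then acc
  else
    let ind2entity := acc.2 ++ [entity]
    (acc.1.insert entity (PySem.List.len ind2entity - 1), ind2entity)

def build_dicts (entities : List String) : List String × (List (String × Int)) :=
  let res :=
    (PySem.List.pyRange 0 (PySem.List.len entities) 1).foldl
      (fun acc i => pvStepA acc (PySem.List.pyGetD entities i "")) (PySem.Dict.empty, [])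
  (res.2, res.1.items)

-- ===== PORT B =====
-- reversed() loop with prepend + list-comprehension filter; then the dict comprehension
-- over enumerate: its keys are pairwise distinct, so its association list is exactly the
-- swapped enumerate pairs.
def build_dicts_alt (entities : List String) : List String × (List (String × Int)) :=
  let ind2entity :=
    entities.reverse.foldl (fun acc entity => entity :: acc.filter (fun e => e != entity)) []
  (ind2entity, (PySem.List.enumerate ind2entity 0).map (fun p => (p.2, p.1)))

-- ===== PRECONDITION & SPEC =====
def Spec_build_dicts (entities : List String) (out : List String × (List (String × Int))) : Prop := out = build_dicts_alt entities
instance (entities : List String) (out : List String × (List (String × Int))) : Decidable (Spec_build_dicts entities out) := by unfold Spec_build_dicts; infer_instance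

-- ===== CLAIM (what is proved, stated in full; the proofs are below) =====
def Claim_equal_build_dicts : Prop := ∀ (entities : List String), Dom_build_dicts entities → Spec_build_dicts entities (build_dicts entities)

-- ===== LEMMAS AND PROOFS =====

-- loop invariant of A: after folding xs from state (d, l) with l duplicate-free and
-- d's items the swapped enumeration of l, the list becomes Set.update l xs and the
-- dict's items the swapped enumeration of that list.
theorem pvLoopA (xs : List String) (d : PySem.Dict String Int) (l : List String)
    (hl : l.Nodup)
    (hd : d.items = (PySem.List.enumerate l 0).map (fun p => (p.2, p.1))) :
    (xs.foldl pvStepA (d, l)).2 = PySem.Set.update l xs ∧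
    (xs.foldl pvStepA (d, l)).1.items =
      (PySem.List.enumerate (PySem.Set.update l xs) 0).map (fun p => (p.2, p.1)) := by
  induction xs generalizing d l with
  | nil => exact ⟨by simp [PySem.Set.update], by simp [PySem.Set.update, hd]⟩
  | cons x xs ih =>
    have hkeys : d.keys = l := by
      simp [PySem.Dict.keys, hd, List.map_map, Function.comp_def,
        PySem.List.map_snd_enumerate]
    by_cases hx : x ∈ l
    · have hadd : PySem.Set.add l x = l := by
        simp [PySem.Set.add, PySem.Set.contains, hx]
      have hstep : pvStepA (d, l) x = (d, l) := by
        simp [pvStepA, hx]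
      simp only [List.foldl_cons, hstep, PySem.Set.update] at *
      simpa [hadd] using ih d l hl hd
    · have hadd : PySem.Set.add l x = l ++ [x] := by
        simp [PySem.Set.add, PySem.Set.contains, hx]
      have hnc : d.contains x = false := by
        rw [← Bool.not_eq_true]
        simp [PySem.Dict.contains_iff_mem_keys, hkeys, hx]
      have hlen : PySem.List.len (l ++ [x]) - 1 = (l.length : Int) := by
        simp [PySem.List.len_eq]
      have hstep : pvStepA (d, l) x = (d.insert x (l.length : Int), l ++ [x]) := by
        simp only [pvStepA, if_neg hx]
        rw [hlen]
      have hd' : (d.insert x (l.length : Int)).items =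
          (PySem.List.enumerate (l ++ [x]) 0).map (fun p => (p.2, p.1)) := by
        rw [PySem.Dict.items_insert_of_not_contains _ _ hnc, hd,
          PySem.List.enumerate_append]
        simp [PySem.List.enumerate_cons]
      have hnd' : (l ++ [x]).Nodup := by
        simp only [List.nodup_append, List.nodup_cons, List.not_mem_nil,
          not_false_eq_true, List.nodup_nil, and_true, true_and]
        refine ⟨hl, ?_⟩
        intro a ha b hb h
        simp only [List.mem_singleton] at hb
        exact hx ((h.trans hb) ▸ ha)
      simp only [List.foldl_cons, hstep, PySem.Set.update] at *
      simpa [hadd] using ih _ _ hnd' hd'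

-- B's reverse-foldl as a foldr (structural form for the induction)
def pvF (xs : List String) : List String :=
  xs.foldr (fun entity acc => entity :: acc.filter (fun e => e != entity)) []

-- A's forward first-occurrence dedup equals back-to-front filtering, relative to a seed l
theorem pvUpdate_eq_pvF (xs : List String) (l : List String) :
    PySem.Set.update l xs = l ++ (pvF xs).filter (fun e => !(decide (e ∈ l))) := by
  induction xs generalizing l with
  | nil => simp [PySem.Set.update, pvF]
  | cons x xs ih =>
    simp only [PySem.Set.update, List.foldl_cons] at *
    by_cases hx : x ∈ l
    · have hadd : PySem.Set.add l x = l := by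
        simp [PySem.Set.add, PySem.Set.contains, hx]
      rw [hadd, ih l]
      congr 1
      simp only [pvF, List.foldr_cons, List.filter_cons]
      have : (!(decide (x ∈ l))) = false := by simp [hx]
      rw [this]
      simp only [Bool.false_eq_true, if_false, List.filter_filter]
      apply List.filter_congr
      intro a _
      by_cases hax : a = x
      · subst hax; simp [hx]
      · simp [bne, hax]
    · have hadd : PySem.Set.add l x = l ++ [x] := by
        simp [PySem.Set.add, PySem.Set.contains, hx]
      rw [hadd, ih (l ++ [x])]
      simp only [pvF, List.foldr_cons, List.filter_cons]
      have hxl : (!(decide (x ∈ l))) = true := by simp [hx]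
      rw [List.append_assoc]
      congr 1
      have : (fun e => !(decide (e ∈ l ++ [x]))) =
          fun e => (e != x) && (!(decide (e ∈ l))) := by
        funext e
        by_cases hex : e = x
        · subst hex; simp
        · simp [List.mem_append, hex, bne]
      rw [this]
      simp only [hxl, if_true, List.filter_filter, List.singleton_append,
        List.cons.injEq, true_and]
      apply List.filter_congr
      intro a _
      exact Bool.and_comm _ _
  
-- ===== VERDICT (by name: the statement is the Claim_ definition above) =====
theorem build_dicts_spec : Claim_equal_build_dicts := by
  intro entities _
  show build_dicts entities = build_dicts_alt entities
  unfold build_dicts build_dicts_alt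
  rw [PySem.List.foldl_pyRange_pyGetD entities "" pvStepA _ (by norm_num)]
  have h := pvLoopA entities PySem.Dict.empty [] (by simp)
    (by simp [PySem.List.enumerate_nil, PySem.Dict.empty])
  simp only [Int.toNat_zero, List.drop_zero] at h ⊢
  have hded : PySem.Set.update ([] : List String) entities =
      entities.reverse.foldl (fun acc entity => entity :: acc.filter (fun e => e != entity)) [] := by
    rw [List.foldl_reverse, pvUpdate_eq_pvF entities []]
    simp [pvF]
  rw [h.1, h.2, hded]
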